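-- pv_equiv track=rewrite | github.com/Kokomolokolo/Kokomolokolo | BilderBenenen.py | erstelle_liste_uhrzeiten
-- ===== SOURCE A (Python) =====
-- def erstelle_liste_uhrzeiten(laengen):
--     sekunde = 0
--     minute = 0
--     stunde = 0
--     liste_uhrzeiten = list(range(1,laengen + 1))
--     rueckgabe_liste = []
--     for zahl in liste_uhrzeiten:
--         str_uhrzeit_neu = str(stunde).zfill(2) + ":" +  str(minute).zfill(2) + ":" + str(sekunde).zfill(2)
--         sekunde = sekunde + 1
--         if sekunde == 60:
--             sekunde = 0
--             minute = minute + 1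
--         if minute == 60:
--             minute = 0
--             stunde = stunde + 1
--         rueckgabe_liste.append(str_uhrzeit_neu)
--     return rueckgabe_liste
-- ===== SOURCE B (Python) =====
-- def erstelle_liste_uhrzeiten(laengen):
--     rueckgabe_liste = []
--     for i in range(laengen):
--         stunde, rest = divmod(i, 3600)
--         minute, sekunde = divmod(rest, 60)
--         rueckgabe_liste.append(str(stunde).zfill(2) + ":" + str(minute).zfill(2) + ":" + str(sekunde).zfill(2))
--     return rueckgabe_liste
-- ===== Notes on version B (the rewrite author's own statement) =====
-- stated objective: simpler
-- what changed: Replaces the three mutable carry counters (sekunde/minute/stunde) and their cascading rollover branches with a stateless per-index closed form: each timestamp is computed directly from its index via divmod(i, 3600) and divmod(rest, 60).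
import Mathlib
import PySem

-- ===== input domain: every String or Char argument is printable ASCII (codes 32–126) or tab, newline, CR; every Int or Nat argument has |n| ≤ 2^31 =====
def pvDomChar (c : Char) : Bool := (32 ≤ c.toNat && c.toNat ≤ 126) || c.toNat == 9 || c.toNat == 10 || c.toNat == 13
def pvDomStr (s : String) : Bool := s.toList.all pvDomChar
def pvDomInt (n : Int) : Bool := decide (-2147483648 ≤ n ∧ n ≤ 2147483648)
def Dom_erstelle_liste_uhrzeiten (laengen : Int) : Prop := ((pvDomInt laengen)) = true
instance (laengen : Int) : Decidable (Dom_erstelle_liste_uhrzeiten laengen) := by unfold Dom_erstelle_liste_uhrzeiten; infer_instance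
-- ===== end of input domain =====

-- B replaces A's incremental carry counters by a stateless divmod closed form per index (simpler; same O(n) cost).

-- ===== PORT A =====
-- one loop iteration of A: emit the current counters, then cascade the carries
def pvStepA (st : (Int × Int × Int) × List String) : (Int × Int × Int) × List String :=
  let sekunde := st.1.1
  let minute := st.1.2.1
  let stunde := st.1.2.2
  let str_uhrzeit_neu :=
    PySem.Str.zfill (PySem.Int.toStr stunde) 2 ++ ":" ++
    PySem.Str.zfill (PySem.Int.toStr minute) 2 ++ ":" ++
    PySem.Str.zfill (PySem.Int.toStr sekunde) 2
  let sekunde := sekunde + 1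
  let p1 := if sekunde == 60 then ((0 : Int), minute + 1) else (sekunde, minute)
  let sekunde := p1.1
  let minute := p1.2
  let p2 := if minute == 60 then ((0 : Int), stunde + 1) else (minute, stunde)
  let minute := p2.1
  let stunde := p2.2
  ((sekunde, minute, stunde), st.2 ++ [str_uhrzeit_neu])

def erstelle_liste_uhrzeiten (laengen : Int) : List String :=
  let liste_uhrzeiten := PySem.List.pyRange 1 (laengen + 1) 1
  (liste_uhrzeiten.foldl (fun st _zahl => pvStepA st) (((0 : Int), (0 : Int), (0 : Int)), ([] : List String))).2

-- ===== PORT B =====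
-- per-index closed form: h, rest = divmod(i, 3600); m, s = divmod(rest, 60)
def pvFmtB (i : Int) : String :=
  let stunde := PySem.Int.floordiv i 3600
  let rest := PySem.Int.mod i 3600
  let minute := PySem.Int.floordiv rest 60
  let sekunde := PySem.Int.mod rest 60
  PySem.Str.zfill (PySem.Int.toStr stunde) 2 ++ ":" ++
  PySem.Str.zfill (PySem.Int.toStr minute) 2 ++ ":" ++
  PySem.Str.zfill (PySem.Int.toStr sekunde) 2

def erstelle_liste_uhrzeiten_alt (laengen : Int) : List String :=
  (PySem.List.pyRange 0 laengen 1).map pvFmtB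

-- ===== PRECONDITION & SPEC =====
def Spec_erstelle_liste_uhrzeiten (laengen : Int) (out : List String) : Prop := out = erstelle_liste_uhrzeiten_alt laengen
instance (laengen : Int) (out : List String) : Decidable (Spec_erstelle_liste_uhrzeiten laengen out) := by unfold Spec_erstelle_liste_uhrzeiten; infer_instance

-- ===== CLAIM (what is proved, stated in full; the proofs are below) =====
def Claim_equal_erstelle_liste_uhrzeiten : Prop := ∀ (laengen : Int), Dom_erstelle_liste_uhrzeiten laengen → Spec_erstelle_liste_uhrzeiten laengen (erstelle_liste_uhrzeiten laengen)

-- ===== LEMMAS AND PROOFS =====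

-- the counter state of A after k iterations
def pvState (k : Nat) : Int × Int × Int :=
  (((k % 60 : Nat) : Int), ((k / 60 % 60 : Nat) : Int), ((k / 3600 : Nat) : Int))

theorem pv_foldl_iterate (L : List Int) (init : (Int × Int × Int) × List String) :
    L.foldl (fun st _zahl => pvStepA st) init = pvStepA^[L.length] init := by
  induction L generalizing init with
  | nil => rfl
  | cons a L ih => simp [List.foldl_cons, ih, Function.iterate_succ_apply]

theorem pv_fmt_state (k : Nat) :
    PySem.Str.zfill (PySem.Int.toStr (pvState k).2.2) 2 ++ ":" ++
    PySem.Str.zfill (PySem.Int.toStr (pvState k).2.1) 2 ++ ":" ++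
    PySem.Str.zfill (PySem.Int.toStr (pvState k).1) 2 = pvFmtB (k : Int) := by
  have h1 : PySem.Int.floordiv (k : Int) 3600 = ((k / 3600 : Nat) : Int) := by
    exact_mod_cast PySem.Int.floordiv_natCast k 3600
  have h2 : PySem.Int.mod (k : Int) 3600 = ((k % 3600 : Nat) : Int) := by
    exact_mod_cast PySem.Int.mod_natCast k 3600
  have h3 : PySem.Int.floordiv ((k % 3600 : Nat) : Int) 60 = ((k % 3600 / 60 : Nat) : Int) := by
    exact_mod_cast PySem.Int.floordiv_natCast (k % 3600) 60
  have h4 : PySem.Int.mod ((k % 3600 : Nat) : Int) 60 = ((k % 3600 % 60 : Nat) : Int) := by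
    exact_mod_cast PySem.Int.mod_natCast (k % 3600) 60
  have e1 : k / 60 % 60 = k % 3600 / 60 := by omega
  have e2 : k % 60 = k % 3600 % 60 := by omega
  simp only [pvFmtB, pvState, h1, h2, h3, h4, e1, e2]

theorem pv_step_state (k : Nat) (acc : List String) :
    pvStepA (pvState k, acc) = (pvState (k + 1), acc ++ [pvFmtB (k : Int)]) := by
  rw [show pvStepA (pvState k, acc)
      = ((let sekunde := (pvState k).1 + 1;
          let p1 := if sekunde == 60 then ((0 : Int), (pvState k).2.1 + 1) else (sekunde, (pvState k).2.1);
          let p2 := if p1.2 == 60 then ((0 : Int), (pvState k).2.2 + 1) else (p1.2, (pvState k).2.2);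
          (p1.1, p2.1, p2.2)),
         acc ++ [PySem.Str.zfill (PySem.Int.toStr (pvState k).2.2) 2 ++ ":" ++
                 PySem.Str.zfill (PySem.Int.toStr (pvState k).2.1) 2 ++ ":" ++
                 PySem.Str.zfill (PySem.Int.toStr (pvState k).1) 2]) from rfl,
      pv_fmt_state]
  refine Prod.ext ?_ rfl
  simp only [pvState, beq_iff_eq]
  split_ifs <;>
    refine Prod.ext (by simp_all; omega) (Prod.ext (by simp_all; omega) (by simp_all; omega))

theorem pv_iterate_spec (k : Nat) :
    pvStepA^[k] (((0 : Int), (0 : Int), (0 : Int)), ([] : List String))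
      = (pvState k, (List.range k).map (fun j : Nat => pvFmtB (j : Int))) := by
  induction k with
  | zero => rfl
  | succ k ih =>
      rw [Function.iterate_succ_apply', ih, pv_step_state, List.range_succ, List.map_append]
      rfl

-- ===== VERDICT (by name: the statement is the Claim_ definition above) =====
theorem erstelle_liste_uhrzeiten_spec : Claim_equal_erstelle_liste_uhrzeiten := by
  intro n _
  show (List.foldl (fun st _zahl => pvStepA st)
      (((0 : Int), (0 : Int), (0 : Int)), ([] : List String))
      (PySem.List.pyRange 1 (n + 1) 1)).2 = (PySem.List.pyRange 0 n 1).map pvFmtB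
  rw [pv_foldl_iterate, PySem.List.length_pyRange_one, show (n + 1 - 1) = n by ring,
      pv_iterate_spec, PySem.List.pyRange_one 0 n]
  simp [List.map_map, Function.comp]
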